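-- pv_equiv track=rewrite | github.com/aliceditucci/Random_cubo | Random_cubo_codes/warm_start_parameters_lightcone.py | find_light_cone
-- ===== SOURCE A (Python) =====
-- def find_light_cone(pairs):
--     lightcone_dict = {}
--     for index, list in enumerate(pairs):
--         for pair in list:
--             qi, qj = pair
--             relevent_pairs = []  ##  qubit pairs in the previous layer that in the lightcone of the current pair
--             if index > 0:
--                 for pair_layerm1 in pairs[index-1]: ## qubit pairs in the previous layer
--                     if (qi in pair_layerm1) or (qj in pair_layerm1):
--                         relevent_pairs.append(pair_layerm1)
--             lightcone_dict[pair] = relevent_pairs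
--     return lightcone_dict
-- ===== SOURCE B (Python) =====
-- def find_light_cone(pairs):
--     lightcone_dict = {}
--     prev = []
--     for layer in pairs:
--         for pair in layer:
--             lightcone_dict[pair] = []
--         qubit_index = {}
--         for pair in layer:
--             a, b = pair
--             qubit_index[a] = qubit_index.get(a, []) + [pair]
--             qubit_index[b] = qubit_index.get(b, []) + [pair]
--         for q in prev:
--             for target in dict.fromkeys(qubit_index.get(q[0], []) + qubit_index.get(q[1], [])):
--                 lightcone_dict[target].append(q)
--         prev = layer
--     return lightcone_dict
-- ===== Notes on version B (the rewrite author's own statement) =====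
-- stated objective: alternative
-- what changed: A gathers: for every current pair it rescans the whole previous layer; B scatters: per layer it initialises each current pair's list, builds a qubit-to-pairs index of the current layer, then walks the previous layer once, appending each previous pair to the (deduplicated) current pairs reachable through the index.
import Mathlib
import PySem

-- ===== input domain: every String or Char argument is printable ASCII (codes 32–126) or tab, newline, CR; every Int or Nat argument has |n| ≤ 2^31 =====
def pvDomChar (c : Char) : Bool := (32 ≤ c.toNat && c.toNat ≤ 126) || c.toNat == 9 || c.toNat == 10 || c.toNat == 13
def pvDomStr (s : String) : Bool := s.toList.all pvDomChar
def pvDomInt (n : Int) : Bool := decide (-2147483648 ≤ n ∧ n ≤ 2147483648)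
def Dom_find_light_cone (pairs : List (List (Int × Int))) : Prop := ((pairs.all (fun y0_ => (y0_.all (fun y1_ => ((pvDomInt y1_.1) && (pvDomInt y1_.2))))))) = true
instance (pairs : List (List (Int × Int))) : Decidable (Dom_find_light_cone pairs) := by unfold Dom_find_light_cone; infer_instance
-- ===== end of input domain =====

-- B replaces A's gather (for every current pair, scan the whole previous layer) by a
-- qubit-indexed scatter: per layer it initialises every current pair's list, indexes the
-- current pairs by qubit, then walks the PREVIOUS layer once and appends each previous pair
-- to exactly the current pairs it touches (deduplicated per previous pair).

-- ===== PORT A =====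
def find_light_cone (pairs : List (List (Int × Int))) : List (Int × Int × List (Int × Int)) :=
  let d := (PySem.List.enumerate pairs).foldl
    (fun (d : PySem.Dict (Int × Int) (List (Int × Int))) il =>
      il.2.foldl (fun d pair =>
        d.insert pair (
          if il.1 > 0 then
            -- index > 0, so pairs[index-1] is always in range: pyGetD's default is never used
            (PySem.List.pyGetD pairs (il.1 - 1) []).foldl (fun acc pl =>
              if (pair.1 == pl.1 || pair.1 == pl.2) || (pair.2 == pl.1 || pair.2 == pl.2)
              then acc ++ [pl] else acc) []
          else [])) d)
    PySem.Dict.empty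
  d.items.map (fun kv => (kv.1.1, kv.1.2, kv.2))

-- ===== PORT B =====
def find_light_cone_alt (pairs : List (List (Int × Int))) : List (Int × Int × List (Int × Int)) :=
  let st := pairs.foldl
    (fun (st : PySem.Dict (Int × Int) (List (Int × Int)) × List (Int × Int)) layer =>
      let d := layer.foldl (fun d pair => d.insert pair ([] : List (Int × Int))) st.1
      let qindex := layer.foldl
        (fun (ix : PySem.Dict Int (List (Int × Int))) pair =>
          let ix1 := ix.insert pair.1 (ix.getD pair.1 [] ++ [pair])
          ix1.insert pair.2 (ix1.getD pair.2 [] ++ [pair]))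
        PySem.Dict.empty
      let d := st.2.foldl (fun d q =>
        (PySem.List.dedup (qindex.getD q.1 [] ++ qindex.getD q.2 [])).foldl
          -- lightcone_dict[target].append(q): target is always a present key, default unused
          (fun d t => d.modify t [] (fun v => v ++ [q])) d) d
      (d, layer))
    (PySem.Dict.empty, [])
  st.1.items.map (fun kv => (kv.1.1, kv.1.2, kv.2))

-- ===== PRECONDITION & SPEC =====
def Spec_find_light_cone (pairs : List (List (Int × Int))) (out : List (Int × Int × List (Int × Int))) : Prop := out = find_light_cone_alt pairs
instance (pairs : List (List (Int × Int))) (out : List (Int × Int × List (Int × Int))) : Decidable (Spec_find_light_cone pairs out) := by unfold Spec_find_light_cone; infer_instance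

-- ===== CLAIM (what is proved, stated in full; the proofs are below) =====
def Claim_equal_find_light_cone : Prop := ∀ (pairs : List (List (Int × Int))), Dom_find_light_cone pairs → Spec_find_light_cone pairs (find_light_cone pairs)

-- ===== LEMMAS AND PROOFS =====

/-- A's membership test: does previous-layer pair `q` share a qubit with current pair `p`? -/
def condA (p q : Int × Int) : Bool :=
  (p.1 == q.1 || p.1 == q.2) || (p.2 == q.1 || p.2 == q.2)

/-- Common layer step: insert every pair of `layer` with the filtered previous layer. -/
def stepSpec (d : PySem.Dict (Int × Int) (List (Int × Int))) (prev layer : List (Int × Int)) :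
    PySem.Dict (Int × Int) (List (Int × Int)) :=
  layer.foldl (fun d p => d.insert p (prev.filter (fun q => condA p q))) d

/-- Common whole-program shape: fold `stepSpec` over the layers, threading the previous layer. -/
def goSpec : PySem.Dict (Int × Int) (List (Int × Int)) → List (Int × Int) →
    List (List (Int × Int)) → PySem.Dict (Int × Int) (List (Int × Int))
  | d, _, [] => d
  | d, prev, l :: ls => goSpec (stepSpec d prev l) l ls

/-- A key-dependent-value insert loop: final lookup is by key only (last insert wins). -/
lemma getD_foldl_insert_fun (g : Int × Int → List (Int × Int)) :
    ∀ (l : List (Int × Int)) (d : PySem.Dict (Int × Int) (List (Int × Int))) (k : Int × Int),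
      (l.foldl (fun d p => d.insert p (g p)) d).getD k [] =
        if k ∈ l then g k else d.getD k []
  | [], d, k => by simp
  | p :: l, d, k => by
    simp only [List.foldl_cons, getD_foldl_insert_fun g l, List.mem_cons]
    by_cases hk : k ∈ l
    · simp [hk]
    · by_cases he : k = p
      · subst he; simp [hk, PySem.Dict.getD_insert_self]
      · simp [hk, he, PySem.Dict.getD_insert_of_ne _ _ _ he]

/-- The per-occurrence contents contributed to qubit bucket `a` by `layer`. -/
def bucket (layer : List (Int × Int)) (a : Int) : List (Int × Int) :=
  layer.flatMap (fun p => (if p.1 == a then [p] else []) ++ (if p.2 == a then [p] else []))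

lemma qindex_getD :
    ∀ (layer : List (Int × Int)) (ix : PySem.Dict Int (List (Int × Int))) (a : Int),
      (layer.foldl
        (fun (ix : PySem.Dict Int (List (Int × Int))) pair =>
          let ix1 := ix.insert pair.1 (ix.getD pair.1 [] ++ [pair])
          ix1.insert pair.2 (ix1.getD pair.2 [] ++ [pair])) ix).getD a [] =
      ix.getD a [] ++ bucket layer a
  | [], ix, a => by simp [bucket]
  | p :: l, ix, a => by
    simp only [List.foldl_cons, qindex_getD l, bucket, List.flatMap_cons]
    have hstep :
        ((ix.insert p.1 (ix.getD p.1 [] ++ [p])).insert p.2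
            ((ix.insert p.1 (ix.getD p.1 [] ++ [p])).getD p.2 [] ++ [p])).getD a [] =
          ix.getD a [] ++ ((if p.1 == a then [p] else []) ++ (if p.2 == a then [p] else [])) := by
      by_cases h1 : a = p.1 <;> by_cases h2 : a = p.2
      · simp [← h1, ← h2, PySem.Dict.getD_insert_self]
      · simp [← h1, PySem.Dict.getD_insert_of_ne _ _ _ h2, PySem.Dict.getD_insert_self,
          Ne.symm h2]
      · simp [← h2, PySem.Dict.getD_insert_self, PySem.Dict.getD_insert_of_ne _ _ _ h1,
          Ne.symm h1]
      · simp [PySem.Dict.getD_insert_of_ne _ _ _ h2, PySem.Dict.getD_insert_of_ne _ _ _ h1,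
          Ne.symm h1, Ne.symm h2]
    rw [hstep]; simp

lemma mem_bucket (layer : List (Int × Int)) (a : Int) (p : Int × Int) :
    p ∈ bucket layer a ↔ p ∈ layer ∧ (p.1 = a ∨ p.2 = a) := by
  simp only [bucket, List.mem_flatMap, List.mem_append]
  constructor
  · rintro ⟨r, hr, h⟩
    rcases h with h | h <;> [skip; skip] <;>
      · split at h <;> simp_all
  · rintro ⟨hp, h⟩
    refine ⟨p, hp, ?_⟩
    rcases h with h | h
    · left; simp [h]
    · right; simp [h]

-- scatter inner loop: append q to the bucketed targets; lookup at k gains [q] iff k is a target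
lemma scatter_inner_getD (targets : List (Int × Int)) (hnd : targets.Nodup)
    (q : Int × Int) (d : PySem.Dict (Int × Int) (List (Int × Int))) (k : Int × Int) :
    (targets.foldl (fun d t => d.modify t [] (fun v => v ++ [q])) d).getD k [] =
      d.getD k [] ++ (if k ∈ targets then [q] else []) := by
  have h1 : targets.foldl (fun d t => d.modify t [] (fun v => v ++ [q])) d =
      (targets.map (fun t => (t, q))).foldl (fun d p => d.modify p.1 [] (fun v => v ++ [p.2])) d := by
    rw [List.foldl_map]
  rw [h1, PySem.Dict.getD_foldl_modify_append]
  congr 1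
  have h2 : (targets.map (fun t => (t, q))).filter (fun p => p.1 == k) =
      (targets.filter (fun t => t == k)).map (fun t => (t, q)) := by
    rw [List.filter_map]; rfl
  rw [h2, List.filter_beq]
  by_cases hk : k ∈ targets
  · rw [List.count_eq_one_of_mem hnd hk]; simp [hk]
  · rw [List.count_eq_zero.mpr hk]; simp [hk]

lemma scatter_inner_keys (q : Int × Int) :
    ∀ (targets : List (Int × Int)) (d : PySem.Dict (Int × Int) (List (Int × Int))),
      (∀ t ∈ targets, t ∈ d.keys) →
      (targets.foldl (fun d t => d.modify t [] (fun v => v ++ [q])) d).keys = d.keys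
  | [], d, _ => rfl
  | t :: ts, d, h => by
    have hmem : t ∈ d.keys := h t (by simp)
    have hc : d.contains t = true := (PySem.Dict.contains_iff_mem_keys d t).mpr hmem
    have hk : (d.modify t [] (fun v => v ++ [q])).keys = d.keys := by
      rw [PySem.Dict.keys_modify, PySem.Dict.keys_insert_of_contains _ _ hc]
    simp only [List.foldl_cons]
    rw [scatter_inner_keys q ts _ (fun u hu => by rw [hk]; exact h u (by simp [hu])), hk]

lemma scatter_getD (targets : Int × Int → List (Int × Int))
    (hnd : ∀ q, (targets q).Nodup) (k : Int × Int) :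
    ∀ (prev : List (Int × Int)) (d : PySem.Dict (Int × Int) (List (Int × Int))),
      (prev.foldl (fun d q =>
        (targets q).foldl (fun d t => d.modify t [] (fun v => v ++ [q])) d) d).getD k [] =
      d.getD k [] ++ prev.filter (fun q => decide (k ∈ targets q))
  | [], d => by simp
  | q :: prev, d => by
    simp only [List.foldl_cons, scatter_getD targets hnd k prev, List.filter_cons]
    rw [scatter_inner_getD (targets q) (hnd q) q d k]
    by_cases hk : k ∈ targets q <;> simp [hk]

lemma scatter_keys (targets : Int × Int → List (Int × Int)) :
    ∀ (prev : List (Int × Int)) (d : PySem.Dict (Int × Int) (List (Int × Int))),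
      (∀ q t, t ∈ targets q → t ∈ d.keys) →
      (prev.foldl (fun d q =>
        (targets q).foldl (fun d t => d.modify t [] (fun v => v ++ [q])) d) d).keys = d.keys
  | [], _, _ => rfl
  | q :: prev, d, h => by
    have hk : ((targets q).foldl (fun d t => d.modify t [] (fun v => v ++ [q])) d).keys = d.keys :=
      scatter_inner_keys q (targets q) d (fun t ht => h q t ht)
    simp only [List.foldl_cons]
    rw [scatter_keys targets prev _ (fun q' t ht => by rw [hk]; exact h q' t ht), hk]

/-- The qubit index B builds for one layer. -/
def qx (layer : List (Int × Int)) : PySem.Dict Int (List (Int × Int)) :=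
  layer.foldl
    (fun (ix : PySem.Dict Int (List (Int × Int))) pair =>
      let ix1 := ix.insert pair.1 (ix.getD pair.1 [] ++ [pair])
      ix1.insert pair.2 (ix1.getD pair.2 [] ++ [pair]))
    PySem.Dict.empty

/-- B's targets for a previous-layer pair `q` against a layer. -/
def tgts (layer : List (Int × Int)) (q : Int × Int) : List (Int × Int) :=
  PySem.List.dedup ((qx layer).getD q.1 [] ++ (qx layer).getD q.2 [])

lemma getD_empty {κ ν : Type} [BEq κ] (k : κ) (d0 : ν) :
    (PySem.Dict.empty : PySem.Dict κ ν).getD k d0 = d0 := rfl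

lemma mem_tgts (layer : List (Int × Int)) (q k : Int × Int) :
    k ∈ tgts layer q ↔ k ∈ layer ∧ condA k q = true := by
  simp only [tgts, PySem.List.mem_dedup, List.mem_append, qx, qindex_getD, getD_empty,
    List.nil_append, mem_bucket, condA]
  constructor
  · rintro (⟨hk, h⟩ | ⟨hk, h⟩) <;> exact ⟨hk, by rcases h with h | h <;> simp [h]⟩
  · rintro ⟨hk, h⟩
    simp only [Bool.or_eq_true, beq_iff_eq] at h
    rcases h with (h | h) | (h | h)
    · exact Or.inl ⟨hk, Or.inl h⟩
    · exact Or.inr ⟨hk, Or.inl h⟩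
    · exact Or.inl ⟨hk, Or.inr h⟩
    · exact Or.inr ⟨hk, Or.inr h⟩

/-- Core lemma: B's per-layer scatter equals A's per-layer gather. -/
lemma stepB_eq_stepSpec (prev layer : List (Int × Int))
    (d : PySem.Dict (Int × Int) (List (Int × Int))) (hnd : d.keys.Nodup) :
    prev.foldl (fun d q =>
        (tgts layer q).foldl (fun d t => d.modify t [] (fun v => v ++ [q])) d)
      (layer.foldl (fun d pair => d.insert pair ([] : List (Int × Int))) d)
    = stepSpec d prev layer := by
  have hkeys1 : (layer.foldl (fun d pair => d.insert pair ([] : List (Int × Int))) d).keys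
      = PySem.Set.update d.keys layer :=
    PySem.Dict.keys_foldl_insert layer (fun _ _ => []) d
  have hnd1 : (layer.foldl (fun d pair => d.insert pair ([] : List (Int × Int))) d).keys.Nodup :=
    PySem.Dict.nodup_keys_foldl_insert layer (fun _ _ => []) d hnd
  have htin : ∀ q t, t ∈ tgts layer q →
      t ∈ (layer.foldl (fun d pair => d.insert pair ([] : List (Int × Int))) d).keys := by
    intro q t ht
    rw [hkeys1, PySem.Set.mem_update]
    exact Or.inr ((mem_tgts layer q t).mp ht).1
  have hkeysL : (prev.foldl (fun d q =>
      (tgts layer q).foldl (fun d t => d.modify t [] (fun v => v ++ [q])) d)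
      (layer.foldl (fun d pair => d.insert pair ([] : List (Int × Int))) d)).keys
      = PySem.Set.update d.keys layer := by
    rw [scatter_keys (tgts layer) prev _ htin, hkeys1]
  have hndL : (prev.foldl (fun d q =>
      (tgts layer q).foldl (fun d t => d.modify t [] (fun v => v ++ [q])) d)
      (layer.foldl (fun d pair => d.insert pair ([] : List (Int × Int))) d)).keys.Nodup := by
    rw [hkeysL, ← hkeys1]; exact hnd1
  have hkeysR : (stepSpec d prev layer).keys = PySem.Set.update d.keys layer :=
    PySem.Dict.keys_foldl_insert layer (fun _ p => prev.filter (fun q => condA p q)) d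
  have hndR : (stepSpec d prev layer).keys.Nodup :=
    PySem.Dict.nodup_keys_foldl_insert layer (fun _ p => prev.filter (fun q => condA p q)) d hnd
  have hget : ∀ k, (prev.foldl (fun d q =>
      (tgts layer q).foldl (fun d t => d.modify t [] (fun v => v ++ [q])) d)
      (layer.foldl (fun d pair => d.insert pair ([] : List (Int × Int))) d)).getD k []
      = (stepSpec d prev layer).getD k [] := by
    intro k
    rw [scatter_getD (tgts layer) (fun q => PySem.List.nodup_dedup _) k prev _]
    rw [getD_foldl_insert_fun (fun _ => []) layer d k]
    rw [show (stepSpec d prev layer).getD k [] =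
      if k ∈ layer then prev.filter (fun q => condA k q) else d.getD k [] from
      getD_foldl_insert_fun (fun p => prev.filter (fun q => condA p q)) layer d k]
    by_cases hk : k ∈ layer
    · simp only [if_pos hk, List.nil_append]
      apply List.filter_congr
      intro q _
      by_cases h : condA k q = true
      · simp [h, (mem_tgts layer q k).mpr ⟨hk, h⟩]
      · have h' : condA k q = false := by simpa using h
        rw [h', decide_eq_false]
        exact fun hc => h ((mem_tgts layer q k).mp hc).2
    · have hnil : prev.filter (fun q => decide (k ∈ tgts layer q)) = [] := by
        apply List.filter_eq_nil_iff.mpr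
        intro q _
        simp only [decide_eq_true_eq]
        exact fun hc => hk ((mem_tgts layer q k).mp hc).1
      simp [if_neg hk, hnil]
  apply PySem.Dict.ext
  rw [PySem.Dict.items_eq_map_keys _ hndL ([] : List (Int × Int)),
    PySem.Dict.items_eq_map_keys _ hndR ([] : List (Int × Int)), hkeysL, ← hkeysR]
  exact List.map_congr_left (fun k _ => by rw [hget k])

lemma nodup_keys_stepSpec (prev layer : List (Int × Int))
    (d : PySem.Dict (Int × Int) (List (Int × Int))) (hnd : d.keys.Nodup) :
    (stepSpec d prev layer).keys.Nodup :=
  PySem.Dict.nodup_keys_foldl_insert layer (fun _ p => prev.filter (fun q => condA p q)) d hnd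

/-- Bridge for A: the enumerate fold is `goSpec`, threading `pairs[i-1]` as the previous layer. -/
lemma bridgeA (pairs : List (List (Int × Int))) :
    ∀ (tl : List (List (Int × Int))) (i : Nat) (d : PySem.Dict (Int × Int) (List (Int × Int))),
      pairs.drop i = tl →
      (PySem.List.enumerate tl (i : Int)).foldl
        (fun (d : PySem.Dict (Int × Int) (List (Int × Int))) il =>
          il.2.foldl (fun d pair =>
            d.insert pair (
              if il.1 > 0 then
                (PySem.List.pyGetD pairs (il.1 - 1) []).foldl (fun acc pl =>
                  if (pair.1 == pl.1 || pair.1 == pl.2) || (pair.2 == pl.1 || pair.2 == pl.2)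
                  then acc ++ [pl] else acc) []
              else [])) d) d
      = goSpec d (if i = 0 then [] else PySem.List.pyGetD pairs ((i : Int) - 1) []) tl
  | [], i, d, _ => by simp [PySem.List.enumerate, goSpec]
  | l :: ls, i, d, hdrop => by
    rw [PySem.List.enumerate_cons, List.foldl_cons]
    have hcast : ((i : Int) + 1) = ((i + 1 : Nat) : Int) := by push_cast; ring
    have hl : pairs.drop (i + 1) = ls := by
      have := congrArg (List.drop 1) hdrop
      simpa [List.drop_drop, Nat.add_comm] using this
    have hpg : PySem.List.pyGetD pairs (((i + 1 : Nat) : Int) - 1) [] = l := by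
      have h1 : (((i + 1 : Nat) : Int) - 1) = ((i : Nat) : Int) := by push_cast; ring
      rw [h1, PySem.List.pyGetD_natCast]
      have : pairs[i]? = some l := by
        have := congrArg (fun xs => xs[0]?) hdrop
        simpa [List.getElem?_drop] using this
      simp [List.getD, this]
    rw [hcast, bridgeA pairs ls (i + 1) _ hl]
    rw [if_neg (Nat.succ_ne_zero i), hpg]
    show goSpec _ l ls
      = goSpec (stepSpec d (if i = 0 then [] else PySem.List.pyGetD pairs ((i : Int) - 1) []) l) l ls
    congr 1
    unfold stepSpec
    apply List.foldl_ext
    intro d' p _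
    congr 1
    by_cases hi : i = 0
    · subst hi
      simp
    · have hpos : (0 : Int) < (i : Int) := by exact_mod_cast Nat.pos_of_ne_zero hi
      simp only [hi, if_false, gt_iff_lt, if_pos hpos]
      rw [PySem.List.foldl_append_if
        (fun pl => (p.1 == pl.1 || p.1 == pl.2) || (p.2 == pl.1 || p.2 == pl.2)) (fun x => x)
        (PySem.List.pyGetD pairs ((i : Int) - 1) []) []]
      simp [condA]

/-- Bridge for B: the layer fold threading (dict, prev) is `goSpec`. -/
lemma bridgeB :
    ∀ (ls : List (List (Int × Int))) (prev : List (Int × Int))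
      (d : PySem.Dict (Int × Int) (List (Int × Int))), d.keys.Nodup →
      (ls.foldl
        (fun (st : PySem.Dict (Int × Int) (List (Int × Int)) × List (Int × Int)) layer =>
          let d := layer.foldl (fun d pair => d.insert pair ([] : List (Int × Int))) st.1
          let qindex := layer.foldl
            (fun (ix : PySem.Dict Int (List (Int × Int))) pair =>
              let ix1 := ix.insert pair.1 (ix.getD pair.1 [] ++ [pair])
              ix1.insert pair.2 (ix1.getD pair.2 [] ++ [pair]))
            PySem.Dict.empty
          let d := st.2.foldl (fun d q =>
            (PySem.List.dedup (qindex.getD q.1 [] ++ qindex.getD q.2 [])).foldl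
              (fun d t => d.modify t [] (fun v => v ++ [q])) d) d
          (d, layer)) (d, prev)).1
      = goSpec d prev ls
  | [], prev, d, _ => rfl
  | l :: ls, prev, d, hnd => by
    rw [List.foldl_cons]
    show (ls.foldl _ ((prev.foldl (fun d q =>
        (tgts l q).foldl (fun d t => d.modify t [] (fun v => v ++ [q])) d)
        (l.foldl (fun d pair => d.insert pair ([] : List (Int × Int))) d)), l)).1
      = goSpec d prev (l :: ls)
    rw [stepB_eq_stepSpec prev l d hnd]
    exact bridgeB ls l (stepSpec d prev l) (nodup_keys_stepSpec prev l d hnd)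

-- ===== VERDICT (by name: the statement is the Claim_ definition above) =====
theorem find_light_cone_spec : Claim_equal_find_light_cone := by
  intro pairs _
  unfold Spec_find_light_cone find_light_cone find_light_cone_alt
  have hA := bridgeA pairs pairs 0 PySem.Dict.empty rfl
  have hB := bridgeB pairs [] PySem.Dict.empty (by simp [PySem.Dict.keys, PySem.Dict.empty])
  simp only [Nat.cast_zero] at hA
  rw [show (if True then ([] : List (Int × Int))
      else PySem.List.pyGetD pairs ((0 : Int) - 1) []) = [] from rfl] at hA
  dsimp only at hA hB ⊢
  rw [hA, hB]
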